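-- pv_equiv track=rewrite | github.com/ddgsdde/bro-skill | vendor/wechat-chat-exporter/export_messages.py | resolve_username
-- ===== SOURCE A (Python) =====
-- def resolve_username(chat_name, contacts):
--     """Resolve chat_name (display name, remark, or wxid) to username."""
--     # Direct match
--     if chat_name in contacts or chat_name.startswith("wxid_") or "@chatroom" in chat_name:
--         return chat_name
--
--     # Exact match on display name
--     chat_lower = chat_name.lower()
--     for uname, display in contacts.items():
--         if chat_lower == display.lower():
--             return uname
--
--     # Fuzzy match (contains)
--     for uname, display in contacts.items():
--         if chat_lower in display.lower():
--             return uname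
--
--     return None
-- ===== SOURCE B (Python) =====
-- def resolve_username(chat_name, contacts):
--     """Resolve chat_name (display name, remark, or wxid) to username."""
--     if chat_name in contacts or chat_name.startswith("wxid_") or "@chatroom" in chat_name:
--         return chat_name
--     chat_lower = chat_name.lower()
--     fuzzy = None
--     for uname, display in contacts.items():
--         display_lower = display.lower()
--         if chat_lower == display_lower:
--             return uname
--         if fuzzy is None and chat_lower in display_lower:
--             fuzzy = uname
--     return fuzzy
-- ===== Notes on version B (the rewrite author's own statement) =====
-- stated objective: simpler
-- what changed: Merged A's two separate scans over contacts into one pass that returns on an exact display-name match and records the first fuzzy (substring) match in an accumulator returned after the loop.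
import Mathlib
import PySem

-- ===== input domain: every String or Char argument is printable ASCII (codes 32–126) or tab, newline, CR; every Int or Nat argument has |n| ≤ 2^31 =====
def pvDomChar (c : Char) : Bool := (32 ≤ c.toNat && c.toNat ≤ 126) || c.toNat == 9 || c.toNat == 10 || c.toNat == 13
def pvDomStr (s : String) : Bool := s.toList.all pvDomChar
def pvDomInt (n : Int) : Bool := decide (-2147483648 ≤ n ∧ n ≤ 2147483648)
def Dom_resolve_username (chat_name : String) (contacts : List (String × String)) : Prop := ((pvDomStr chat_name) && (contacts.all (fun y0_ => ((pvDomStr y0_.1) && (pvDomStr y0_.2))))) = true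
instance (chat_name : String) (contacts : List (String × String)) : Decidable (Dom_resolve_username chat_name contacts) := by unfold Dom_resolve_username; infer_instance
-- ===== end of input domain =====

-- B merges A's two scans over contacts into one pass with a first-fuzzy accumulator (objective: simpler).

-- ===== PORT A =====
-- first loop of A: exact match on lowered display name
def pvExactScan (chat_lower : String) : List (String × String) → Option String
  | [] => none
  | (uname, display) :: rest =>
      if chat_lower == PySem.Str.lower display then some uname
      else pvExactScan chat_lower rest

-- second loop of A: fuzzy (substring) match
def pvFuzzyScan (chat_lower : String) : List (String × String) → Option String
  | [] => none
  | (uname, display) :: rest =>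
      if PySem.Str.isIn chat_lower (PySem.Str.lower display) then some uname
      else pvFuzzyScan chat_lower rest

def resolve_username (chat_name : String) (contacts : List (String × String)) : Option String :=
  if contacts.any (fun p => p.1 == chat_name) || PySem.Str.startswith chat_name "wxid_"
      || PySem.Str.isIn "@chatroom" chat_name then
    some chat_name
  else
    let chat_lower := PySem.Str.lower chat_name
    match pvExactScan chat_lower contacts with
    | some uname => some uname
    | none => pvFuzzyScan chat_lower contacts

-- ===== PORT B =====
-- B's single pass: return on exact match, record first fuzzy match, return it after the loop
def pvOneScan (chat_lower : String) : List (String × String) → Option String → Option String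
  | [], fuzzy => fuzzy
  | (uname, display) :: rest, fuzzy =>
      let display_lower := PySem.Str.lower display
      if chat_lower == display_lower then some uname
      else pvOneScan chat_lower rest
        (if fuzzy.isNone && PySem.Str.isIn chat_lower display_lower then some uname else fuzzy)

def resolve_username_alt (chat_name : String) (contacts : List (String × String)) : Option String :=
  if contacts.any (fun p => p.1 == chat_name) || PySem.Str.startswith chat_name "wxid_"
      || PySem.Str.isIn "@chatroom" chat_name then
    some chat_name
  else
    pvOneScan (PySem.Str.lower chat_name) contacts none

-- ===== PRECONDITION & SPEC =====
def Spec_resolve_username (chat_name : String) (contacts : List (String × String)) (out : Option String) : Prop := out = resolve_username_alt chat_name contacts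
instance (chat_name : String) (contacts : List (String × String)) (out : Option String) : Decidable (Spec_resolve_username chat_name contacts out) := by unfold Spec_resolve_username; infer_instance

-- ===== CLAIM (what is proved, stated in full; the proofs are below) =====
def Claim_equal_resolve_username : Prop := ∀ (chat_name : String) (contacts : List (String × String)), Dom_resolve_username chat_name contacts → Spec_resolve_username chat_name contacts (resolve_username chat_name contacts)

-- ===== LEMMAS AND PROOFS =====
-- the single pass equals: exact match first, else the pre-recorded fuzzy, else the fuzzy scan
theorem pvOneScan_eq (cl : String) (l : List (String × String)) (fuzzy : Option String) :
    pvOneScan cl l fuzzy =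
      match pvExactScan cl l with
      | some u => some u
      | none => match fuzzy with
                | some f => some f
                | none => pvFuzzyScan cl l := by
  induction l generalizing fuzzy with
  | nil => cases fuzzy <;> simp [pvOneScan, pvExactScan, pvFuzzyScan]
  | cons p rest ih =>
      obtain ⟨uname, display⟩ := p
      simp only [pvOneScan, pvExactScan, pvFuzzyScan]
      by_cases he : cl == PySem.Str.lower display
      · simp [he]
      · simp only [he, ih]
        cases fuzzy with
        | some f => cases pvExactScan cl rest <;> simp
        | none =>
            by_cases hf : PySem.Str.isIn cl (PySem.Str.lower display) = true <;>
              simp only [hf, Option.isNone_none, Bool.true_and] <;>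
              simp only [Bool.false_eq_true, if_false, if_true]

theorem resolve_username_spec : Claim_equal_resolve_username := by
  intro chat_name contacts _
  unfold Spec_resolve_username resolve_username resolve_username_alt
  split
  · rfl
  · rw [pvOneScan_eq]
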